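-- pv_equiv track=rewrite | github.com/sktkddn777/TIL | algorithm/programmers/level1/신규 아이디 추천.py | solution
-- ===== SOURCE A (Python) =====
-- def solution(new_id):
--     # 1단계
--     lower = new_id.lower()
--
--     txt = ""
--     dot = ''
--
--     # 2, 3 단계
--     for l in lower:
--         asc = ord(l)
--         if 97 <= asc <= 122 or asc == 45 or asc == 95 or 48 <= asc <= 57:
--             txt += l
--             dot = l
--         elif asc == 46:
--             if dot != '.':
--                 txt += l
--             dot = l
--
--     # 4단계
--     if len(txt) > 0:
--         if txt[0] == '.':
--             txt = txt[1:]
--     if len(txt) > 0: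
--         if txt[-1] == '.':
--             txt = txt[:-1]
--
--     # 5단계
--     if len(txt) == 0:
--         txt = "a"
--
--     # 6단계
--     if len(txt) >= 16:
--         txt = txt[:15]
--
--     if txt[-1] == '.':
--         txt = txt[:-1]
--
--     # 7단계
--     if len(txt) <= 2:
--         word = txt[-1]
--         while len(txt) < 3:
--             txt += word
--
--     return txt
-- ===== SOURCE B (Python) =====
-- def solution(new_id):
--     filtered = [c for c in new_id.lower()
--                 if 'a' <= c <= 'z' or c in "0123456789-_."]
--     collapsed = ''.join(c for c, p in zip(filtered, [None] + filtered)
--                         if c != '.' or p != '.')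
--     t = collapsed.strip('.')
--     t = (t or 'a')[:15].rstrip('.')
--     return t + t[-1] * (3 - len(t))
-- ===== Notes on version B (the rewrite author's own statement) =====
-- stated objective: idiomatic
-- what changed: A's single stateful character loop (with a last-char tracker variable) and its chain of guarded one-character edits is replaced by a declarative pipeline: filter the legal characters, collapse dot runs by zipping each character with its predecessor, strip the remaining edge dots, and pad arithmetically with replicate instead of a while loop.
import Mathlib
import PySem

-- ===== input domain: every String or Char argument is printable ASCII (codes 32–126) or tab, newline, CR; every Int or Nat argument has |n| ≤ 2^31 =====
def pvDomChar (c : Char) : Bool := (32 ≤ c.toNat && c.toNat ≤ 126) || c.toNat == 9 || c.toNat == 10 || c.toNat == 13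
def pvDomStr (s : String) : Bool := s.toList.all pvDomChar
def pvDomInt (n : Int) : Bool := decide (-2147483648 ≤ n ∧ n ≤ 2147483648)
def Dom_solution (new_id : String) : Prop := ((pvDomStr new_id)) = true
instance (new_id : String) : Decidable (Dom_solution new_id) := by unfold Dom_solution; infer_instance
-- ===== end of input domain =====

-- B replaces A's stateful character loop (`dot` tracker) and chain of guarded edits by a
-- filter / collapse-against-previous / strip / pad pipeline (objective: idiomatic; same cost).

-- ===== PORT A =====
-- loop body of A's `for l in lower` (state = (txt, dot))
def solStep (st : List Char × List Char) (l : Char) : List Char × List Char :=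
  let asc : Int := l.toNat
  if (97 ≤ asc ∧ asc ≤ 122) ∨ asc = 45 ∨ asc = 95 ∨ (48 ≤ asc ∧ asc ≤ 57) then
    (st.1 ++ [l], [l])
  else if asc = 46 then
    ((if st.2 ≠ ['.'] then st.1 ++ [l] else st.1), [l])
  else st

-- A's step-7 `while len(txt) < 3: txt += word`
def solPad (txt : List Char) (word : Char) : List Char :=
  if txt.length < 3 then solPad (txt ++ [word]) word else txt
termination_by 3 - txt.length
decreasing_by simp; omega

def solution (new_id : String) : String :=
  let lower := (PySem.Str.lower new_id).toList
  let txt := (lower.foldl solStep ([], [])).1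
  let txt := if txt.length > 0 then
      (if PySem.List.pyGet? txt 0 = some '.' then PySem.List.slice txt (some 1) none else txt)
    else txt
  let txt := if txt.length > 0 then
      (if PySem.List.pyGet? txt (-1) = some '.' then PySem.List.slice txt none (some (-1)) else txt)
    else txt
  let txt := if txt.length = 0 then ['a'] else txt
  let txt := if txt.length ≥ 16 then PySem.List.slice txt none (some 15) else txt
  let txt := if PySem.List.pyGet? txt (-1) = some '.' then PySem.List.slice txt none (some (-1)) else txt
  let txt := if txt.length ≤ 2 then
      (match PySem.List.pyGet? txt (-1) with   -- txt[-1]; txt is nonempty here in Python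
       | some word => solPad txt word
       | none => txt)
    else txt
  String.ofList txt

-- ===== PORT B =====
-- B's filter predicate: 'a' <= c <= 'z' or c in "0123456789-_."
def altKeep (c : Char) : Bool := ('a' ≤ c && c ≤ 'z') || "0123456789-_.".toList.contains c

def solution_alt (new_id : String) : String :=
  let filtered := (PySem.Str.lower new_id).toList.filter altKeep
  -- ''.join(c for c, p in zip(filtered, [None] + filtered) if c != '.' or p != '.')
  let collapsed := ((filtered.zip ((none : Option Char) :: filtered.map some)).filter
      (fun cp => cp.1 != '.' || cp.2 != some '.')).map Prod.fst
  let t := PySem.Chars.stripChars collapsed ['.']            -- collapsed.strip('.')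
  let t := if t.isEmpty then ['a'] else t                    -- t or 'a'
  let t := t.take 15                                         -- t[:15] (exact: bounds nonnegative)
  let t := (t.reverse.dropWhile (· == '.')).reverse          -- t.rstrip('.') (hand port, exact)
  match PySem.List.pyGet? t (-1) with                        -- t[-1]; t is nonempty here in Python
  | some w => String.ofList (t ++ List.replicate (3 - t.length) w)  -- t + t[-1]*(3-len(t))
  | none => String.ofList t

-- ===== PRECONDITION & SPEC =====
def Spec_solution (new_id : String) (out : String) : Prop := out = solution_alt new_id
instance (new_id : String) (out : String) : Decidable (Spec_solution new_id out) := by unfold Spec_solution; infer_instance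

-- ===== CLAIM (what is proved, stated in full; the proofs are below) =====
def Claim_equal_solution : Prop := ∀ (new_id : String), Dom_solution new_id → Spec_solution new_id (solution new_id)

-- ===== LEMMAS AND PROOFS =====

-- collapse of dot runs: `col p cs` keeps each char of cs except a '.' whose predecessor
-- was also '.' (p = "previous char was '.'"); characterises both A's loop and B's zip-filter
def col : Bool → List Char → List Char
  | _, [] => []
  | p, c :: cs => if c = '.' then (if p then col true cs else '.' :: col true cs) else c :: col false cs

-- "no two adjacent dots"
def NoDD (l : List Char) : Prop := List.IsChain (fun a b => ¬(a = '.' ∧ b = '.')) l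

lemma char_eq_iff_toNat (c d : Char) : c = d ↔ c.toNat = d.toNat := by
  constructor
  · intro h; rw [h]
  · intro h; exact Char.ext (UInt32.toNat_inj.mp h)

lemma char_le_iff (c d : Char) : (c ≤ d) ↔ c.toNat ≤ d.toNat := by
  simp only [Char.le_def, UInt32.le_iff_toNat_le]; rfl

lemma altKeep_iff (c : Char) : altKeep c = true ↔
    (97 ≤ c.toNat ∧ c.toNat ≤ 122) ∨ c.toNat = 45 ∨ c.toNat = 95 ∨
    (48 ≤ c.toNat ∧ c.toNat ≤ 57) ∨ c.toNat = 46 := by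
  have hl : "0123456789-_.".toList = ['0','1','2','3','4','5','6','7','8','9','-','_','.'] := rfl
  simp only [altKeep, hl, Bool.or_eq_true, Bool.and_eq_true, decide_eq_true_eq,
    List.contains_eq_mem, List.mem_cons, List.not_mem_nil, or_false,
    char_le_iff, char_eq_iff_toNat]
  simp only [show ('a').toNat = 97 from rfl, show ('z').toNat = 122 from rfl,
    show ('0').toNat = 48 from rfl,
    show ('1').toNat = 49 from rfl, show ('2').toNat = 50 from rfl, show ('3').toNat = 51 from rfl,
    show ('4').toNat = 52 from rfl, show ('5').toNat = 53 from rfl, show ('6').toNat = 54 from rfl,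
    show ('7').toNat = 55 from rfl, show ('8').toNat = 56 from rfl, show ('9').toNat = 57 from rfl,
    show ('-').toNat = 45 from rfl, show ('_').toNat = 95 from rfl, show ('.').toNat = 46 from rfl]
  omega

lemma char_dot_iff (c : Char) : ((c.toNat : Int) = 46) ↔ c = '.' := by
  rw [char_eq_iff_toNat c '.', show ('.').toNat = 46 from rfl]
  omega

-- A's loop builds exactly the collapse of the filtered characters
lemma foldA (cs : List Char) : ∀ (txt dot : List Char),
    (List.foldl solStep (txt, dot) cs).1 = txt ++ col (dot == ['.']) (cs.filter altKeep) := by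
  induction cs with
  | nil => intro txt dot; simp [col]
  | cons c cs ih =>
    intro txt dot
    rw [List.foldl_cons]
    by_cases hA : (97 ≤ (c.toNat : Int) ∧ (c.toNat : Int) ≤ 122) ∨ (c.toNat : Int) = 45 ∨
        (c.toNat : Int) = 95 ∨ (48 ≤ (c.toNat : Int) ∧ (c.toNat : Int) ≤ 57)
    · have hk : altKeep c = true := by rw [altKeep_iff]; omega
      have hc : ¬ c = '.' := by rw [← char_dot_iff]; omega
      rw [show solStep (txt, dot) c = (txt ++ [c], [c]) from by
          simp only [solStep]; rw [if_pos hA]]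
      rw [ih, List.filter_cons_of_pos hk]
      rw [show col (dot == ['.']) (c :: List.filter altKeep cs)
            = c :: col false (List.filter altKeep cs) from by simp [col, hc]]
      have : ([c] == ['.']) = false := by simp [hc]
      rw [this]
      simp
    · by_cases hD : (c.toNat : Int) = 46
      · have hc : c = '.' := char_dot_iff c |>.mp hD
        subst hc
        have hk : altKeep '.' = true := by decide
        rw [show solStep (txt, dot) '.' =
              ((if dot ≠ ['.'] then txt ++ ['.'] else txt), ['.']) from by
            simp only [solStep]
            rw [if_neg hA, if_pos hD]]
        rw [ih, List.filter_cons_of_pos hk]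
        have hbeq : (['.'] == ['.']) = true := by decide
        rw [hbeq]
        by_cases hdot : dot = ['.']
        · rw [if_neg (by simp [hdot]), show (dot == ['.']) = true from by simp [hdot]]
          simp [col]
        · rw [if_pos hdot, show (dot == ['.']) = false from by simp [hdot]]
          simp [col]
      · have hk : altKeep c = false := by
          rw [Bool.eq_false_iff, ne_eq, altKeep_iff]; omega
        rw [show solStep (txt, dot) c = (txt, dot) from by
            simp only [solStep]; rw [if_neg hA, if_neg hD]]
        rw [ih, List.filter_cons_of_neg (by simp [hk])]

-- B's zip-with-previous filter is the same collapse
lemma zipPrev (xs : List Char) : ∀ (p : Option Char),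
    ((xs.zip (p :: xs.map some)).filter (fun cp => cp.1 != '.' || cp.2 != some '.')).map Prod.fst
      = col (p == some '.') xs := by
  induction xs with
  | nil => intro p; simp [col]
  | cons c cs ih =>
    intro p
    rw [List.map_cons, List.zip_cons_cons, List.filter_cons]
    by_cases hc : c = '.'
    · subst hc
      by_cases hp : p = some '.'
      · subst hp
        rw [show ((('.':Char), (some ('.':Char))).1 != '.' || (('.':Char), some ('.':Char)).2 != some '.') = false from by decide]
        rw [if_neg (by simp), ih]
        simp [col]
      · rw [show ((('.':Char), p).1 != '.' || (('.':Char), p).2 != some '.') = true from by simp [hp]]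
        rw [if_pos rfl, List.map_cons, ih]
        simp [col, hp]
    · rw [show ((c, p).1 != '.' || (c, p).2 != some '.') = true from by simp [hc]]
      rw [if_pos rfl, List.map_cons, ih]
      rw [show ((some c) == some ('.':Char)) = false from by simp [hc]]
      simp [col, hc]

lemma col_true_head (xs : List Char) : (col true xs).head? ≠ some '.' := by
  induction xs with
  | nil => simp [col]
  | cons c cs ih =>
    by_cases hc : c = '.'
    · subst hc; simpa [col] using ih
    · simp [col, hc]

lemma noDD_cons (c : Char) (l : List Char) (hh : l.head? ≠ some '.' ∨ c ≠ '.')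
    (hl : NoDD l) : NoDD (c :: l) := by
  cases l with
  | nil => simp [NoDD]
  | cons d ds =>
    refine List.isChain_cons_cons.mpr ⟨?_, hl⟩
    rintro ⟨h1, h2⟩
    rcases hh with hh | hh
    · simp [h2] at hh
    · exact hh h1

lemma col_noDD (p : Bool) (xs : List Char) : NoDD (col p xs) := by
  induction xs generalizing p with
  | nil => simp [col, NoDD]
  | cons c cs ih =>
    by_cases hc : c = '.'
    · subst hc
      cases p with
      | true => simpa [col] using ih true
      | false =>
        show NoDD (if ('.':Char) = '.' then (if false then col true cs else '.' :: col true cs) else _)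
        rw [if_pos rfl, if_neg (by simp)]
        exact noDD_cons _ _ (Or.inl (col_true_head cs)) (ih true)
    · show NoDD (if c = '.' then _ else c :: col false cs)
      rw [if_neg hc]
      exact noDD_cons _ _ (Or.inr hc) (ih false)

lemma noDD_reverse (t : List Char) (h : NoDD t) : NoDD t.reverse := by
  rw [NoDD, List.isChain_reverse]
  exact h.imp (fun a b hab => fun hx => hab ⟨hx.2, hx.1⟩)

lemma noDD_dropWhile (t : List Char) (p : Char → Bool) (h : NoDD t) : NoDD (t.dropWhile p) :=
  h.suffix (List.dropWhile_suffix _)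

lemma noDD_take (t : List Char) (n : Nat) (h : NoDD t) : NoDD (t.take n) :=
  h.prefix (List.take_prefix _ _)

lemma pyGet?_zero (t : List Char) : PySem.List.pyGet? t 0 = t.head? := by
  have : t[0]? = t.head? := by cases t <;> rfl
  simpa [pysem] using this

lemma pyGet?_neg_one (t : List Char) : PySem.List.pyGet? t (-1) = t.reverse.head? := by
  simp [pysem]

-- on a list with no adjacent dots, dropping ONE leading dot is lstrip('.')
lemma stripL (t : List Char) (h : NoDD t) :
    (if t.head? = some '.' then t.tail else t) = t.dropWhile (· == '.') := by
  cases t with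
  | nil => simp
  | cons c cs =>
    by_cases hc : c = '.'
    · subst hc
      simp only [List.head?_cons, List.tail_cons, List.dropWhile_cons,
        beq_self_eq_true, if_true]
      cases cs with
      | nil => simp
      | cons d ds =>
        have hd : ¬ d = '.' := by
          intro hd
          exact (List.isChain_cons_cons.mp h).1 ⟨rfl, hd⟩
        simp [hd]
    · simp [List.head?_cons, hc]

-- A's guarded leading-dot removal, in the exact shape it has in `solution`
lemma stripLA (t : List Char) (h : NoDD t) :
    (if t.length > 0 then
        (if PySem.List.pyGet? t 0 = some '.' then PySem.List.slice t (some 1) none else t)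
      else t) = t.dropWhile (· == '.') := by
  cases t with
  | nil => simp
  | cons c cs =>
    rw [if_pos (by simp), PySem.List.slice_from_one, pyGet?_zero]
    exact stripL _ h

-- dropping ONE trailing dot is rstrip('.')
lemma stripR (t : List Char) (h : NoDD t) :
    (if PySem.List.pyGet? t (-1) = some '.' then PySem.List.slice t none (some (-1)) else t)
      = (t.reverse.dropWhile (· == '.')).reverse := by
  have h2 := stripL t.reverse (noDD_reverse t h)
  rw [pyGet?_neg_one, PySem.List.slice_to_neg_one]
  by_cases hc : t.reverse.head? = some '.'
  · rw [if_pos hc]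
    rw [if_pos hc] at h2
    rw [← h2]
    conv_lhs => rw [← List.reverse_reverse t]
    rw [List.dropLast_reverse]
  · rw [if_neg hc]
    rw [if_neg hc] at h2
    rw [← h2, List.reverse_reverse]

lemma stripRA (t : List Char) (h : NoDD t) :
    (if t.length > 0 then
        (if PySem.List.pyGet? t (-1) = some '.' then PySem.List.slice t none (some (-1)) else t)
      else t) = (t.reverse.dropWhile (· == '.')).reverse := by
  cases t with
  | nil => simp
  | cons c cs =>
    rw [if_pos (by simp)]
    exact stripR _ h

lemma emptyA_eq (t x : List Char) :
    (if t.length = 0 then x else t) = (if t.isEmpty then x else t) := by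
  cases t <;> simp

lemma takeA_eq (t : List Char) :
    (if t.length ≥ 16 then PySem.List.slice t none (some 15) else t) = t.take 15 := by
  by_cases hl : t.length ≥ 16
  · rw [if_pos hl, PySem.List.slice_to t (by norm_num)]
    rfl
  · rw [if_neg hl, List.take_of_length_le (by omega)]

lemma solPad_eq_aux (n : Nat) : ∀ (t : List Char) (w : Char), 3 - t.length ≤ n →
    solPad t w = t ++ List.replicate (3 - t.length) w := by
  induction n with
  | zero =>
    intro t w hle
    rw [solPad, if_neg (by omega)]
    have : 3 - t.length = 0 := by omega
    simp [this]
  | succ n ih =>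
    intro t w hle
    by_cases hlt : t.length < 3
    · rw [solPad, if_pos hlt, ih (t ++ [w]) w (by simp; omega)]
      have h3 : 3 - t.length = (3 - (t ++ [w]).length) + 1 := by simp; omega
      rw [h3, List.replicate_succ]
      simp
    · rw [solPad, if_neg hlt]
      have : 3 - t.length = 0 := by omega
      simp [this]

-- A's `while` padding is B's replicate padding
lemma solPad_eq (t : List Char) (w : Char) :
    solPad t w = t ++ List.replicate (3 - t.length) w :=
  solPad_eq_aux (3 - t.length) t w le_rfl

lemma contains_dot_pred : (fun c : Char => (['.'].contains c)) = (fun c : Char => c == '.') := by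
  funext c
  rw [List.contains_eq_mem, Bool.eq_iff_iff]
  simp

lemma main (new_id : String) : solution new_id = solution_alt new_id := by
  unfold solution solution_alt
  dsimp only
  have hT : (List.foldl solStep ([], []) (PySem.Str.lower new_id).toList).1
      = col false ((PySem.Str.lower new_id).toList.filter altKeep) := by
    rw [foldA]
    simp
  have hC : ((((PySem.Str.lower new_id).toList.filter altKeep).zip
        ((none : Option Char) :: ((PySem.Str.lower new_id).toList.filter altKeep).map some)).filter
        (fun cp => cp.1 != '.' || cp.2 != some '.')).map Prod.fst
      = col false ((PySem.Str.lower new_id).toList.filter altKeep) := by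
    simpa using zipPrev ((PySem.Str.lower new_id).toList.filter altKeep) none
  rw [hT, hC]
  set T : List Char := col false ((PySem.Str.lower new_id).toList.filter altKeep) with hTdef
  have h0 : NoDD T := col_noDD false _
  have hS : PySem.Chars.stripChars T ['.']
      = ((T.dropWhile (· == '.')).reverse.dropWhile (· == '.')).reverse := by
    simp only [PySem.Chars.stripChars, contains_dot_pred]
  rw [hS, stripLA T h0]
  have h1 : NoDD (T.dropWhile (· == '.')) := noDD_dropWhile _ _ h0
  rw [stripRA _ h1]
  set T2 : List Char := ((T.dropWhile (· == '.')).reverse.dropWhile (· == '.')).reverse with hT2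
  have h2 : NoDD T2 := noDD_reverse _ (noDD_dropWhile _ _ (noDD_reverse _ h1))
  rw [emptyA_eq T2 ['a']]
  set T3 : List Char := if T2.isEmpty then ['a'] else T2 with hT3
  have h3 : NoDD T3 := by
    rw [hT3]
    split
    · simp [NoDD]
    · exact h2
  rw [takeA_eq T3]
  have h4 : NoDD (T3.take 15) := noDD_take _ _ h3
  rw [stripR _ h4]
  set T5 : List Char := ((T3.take 15).reverse.dropWhile (· == '.')).reverse with hT5
  cases hg : PySem.List.pyGet? T5 (-1) with
  | none =>
    by_cases hlen : T5.length ≤ 2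
    · rw [if_pos hlen]
    · rw [if_neg hlen]
  | some w =>
    by_cases hlen : T5.length ≤ 2
    · rw [if_pos hlen]
      dsimp only
      rw [solPad_eq]
    · rw [if_neg hlen]
      dsimp only
      have h30 : 3 - T5.length = 0 := by omega
      rw [h30]
      simp

-- ===== VERDICT (by name: the statement is the Claim_ definition above) =====
theorem solution_spec : Claim_equal_solution := by
  intro new_id _
  unfold Spec_solution
  exact main new_id
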